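-- pv_equiv track=rewrite | github.com/arnabid/QA | arrays/PawnJump.py | solution
-- ===== SOURCE A (Python) =====
-- def solution(ml):
--
--     n = len(ml)
--     dest, steps = 0,0
--     visited = {}
--     visited[0] = True
--
--     while True:
--         dest += ml[dest]
--         steps += 1
--
--         if dest >= n or dest < 0:
--             return steps
--
--         if not visited.get(dest, False):
--             visited[dest] = True
--         else:
--             return -1
-- ===== SOURCE B (Python) =====
-- def solution(ml):
--     n = len(ml)
--     pos = 0
--     for step in range(1, n + 1):
--         pos += ml[pos]
--         if pos >= n or pos < 0:
--             return step
--     return -1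
-- ===== Notes on version B (the rewrite author's own statement) =====
-- stated objective: simpler
-- what changed: B drops A's visited dictionary and unbounded while-loop: since there are only len(ml) in-bounds positions, a walk still in bounds after len(ml) jumps has revisited a position and can never exit, so B is a bounded for-loop over range(1, n+1) returning the step of the first exit, else -1.
import Mathlib
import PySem

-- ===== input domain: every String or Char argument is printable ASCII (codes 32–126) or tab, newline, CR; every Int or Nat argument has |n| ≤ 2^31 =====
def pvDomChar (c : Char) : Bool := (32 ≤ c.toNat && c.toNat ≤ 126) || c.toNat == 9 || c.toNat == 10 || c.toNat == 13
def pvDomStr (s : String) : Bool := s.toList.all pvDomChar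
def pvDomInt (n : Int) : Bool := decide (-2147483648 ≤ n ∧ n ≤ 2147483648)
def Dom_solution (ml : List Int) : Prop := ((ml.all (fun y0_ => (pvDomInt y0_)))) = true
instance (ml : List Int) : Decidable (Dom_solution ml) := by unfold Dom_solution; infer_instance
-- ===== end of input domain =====

-- B replaces A's visited dictionary and unbounded while-loop by a bounded for-loop
-- over range(1, n+1) (pigeonhole: a walk still in bounds after n jumps has revisited
-- a position and can never exit): simpler, O(1) extra space.

-- ===== PORT A =====
-- A's while-True loop; the Nat fuel is only a totality guard: under Pre_solution the
-- loop returns within ml.length iterations (each non-returning iteration adds a fresh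
-- in-bounds key to visited), so the fuel ml.length never runs out on admitted inputs.
-- ml[dest] is indexed via pyGet?; the .getD 0 default fires only for ml = [] (excluded
-- by Pre_solution, where Python raises IndexError).
def loopA (ml : List Int) (fuel : Nat) (dest steps : Int) (visited : PySem.Dict Int Bool) : Int :=
  match fuel with
  | 0 => -1
  | fuel + 1 =>
    let dest := dest + (PySem.List.pyGet? ml dest).getD 0
    let steps := steps + 1
    if dest ≥ (ml.length : Int) ∨ dest < 0 then steps
    else if ¬ (visited.getD dest false) then loopA ml fuel dest steps (visited.insert dest true)
    else -1

def solution (ml : List Int) : Int :=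
  loopA ml ml.length 0 0 ((PySem.Dict.empty).insert 0 true)

-- ===== PORT B =====
-- B's for-loop over range(1, n+1) as a fold; the accumulator is Sum: .inl pos means the
-- loop is still running at position pos, .inr s means the loop returned s at step s.
def stepB (ml : List Int) : Int ⊕ Int → Int → Int ⊕ Int
  | .inr s, _ => .inr s
  | .inl pos, step =>
    let pos := pos + (PySem.List.pyGet? ml pos).getD 0
    if pos ≥ (ml.length : Int) ∨ pos < 0 then .inr step else .inl pos

def solution_alt (ml : List Int) : Int :=
  match (PySem.List.pyRange 1 ((ml.length : Int) + 1) 1).foldl (stepB ml) (.inl 0) with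
  | .inl _ => -1
  | .inr s => s

-- ===== PRECONDITION & SPEC =====
-- Pre_ excludes only the empty list, on which A raises IndexError at the first ml[dest].
def Pre_solution (ml : List Int) : Prop := ml ≠ []
instance (ml : List Int) : Decidable (Pre_solution ml) := by unfold Pre_solution; infer_instance
def pvWitness_solution : List Int := [2, -1, 3]

def Spec_solution (ml : List Int) (out : Int) : Prop := out = solution_alt ml
instance (ml : List Int) (out : Int) : Decidable (Spec_solution ml out) := by unfold Spec_solution; infer_instance

-- ===== CLAIM (what is proved, stated in full; the proofs are below) =====
def Claim_equal_solution : Prop := ∀ (ml : List Int), Dom_solution ml → Pre_solution ml → Spec_solution ml (solution ml)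

-- ===== LEMMAS AND PROOFS =====

-- the jump trajectory: traj ml k = position after k jumps from 0
def traj (ml : List Int) : Nat → Int
  | 0 => 0
  | k + 1 => traj ml k + (PySem.List.pyGet? ml (traj ml k)).getD 0

-- in bounds
def inb (ml : List Int) (d : Int) : Prop := 0 ≤ d ∧ d < (ml.length : Int)

-- interpret B's fold accumulator as B's return value
def interp : Int ⊕ Int → Int
  | .inl _ => -1
  | .inr s => s

theorem traj_period (ml : List Int) (j p : Nat) (hp : traj ml (j + p) = traj ml j) :
    ∀ m, j ≤ m → traj ml (m + p) = traj ml m := by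
  intro m hm
  induction m with
  | zero => simpa [Nat.le_zero.mp hm] using hp
  | succ m ih =>
    rcases Nat.lt_or_ge j (m + 1) with h | h
    · have hjm : j ≤ m := Nat.lt_succ_iff.mp h
      have := ih hjm
      have hcomm : m + 1 + p = m + p + 1 := by omega
      rw [hcomm]
      simp [traj, this]
    · have : j = m + 1 := le_antisymm hm h
      simpa [this] using hp

-- if the walk revisits a position while still in bounds, it stays in bounds forever
theorem never_exit (ml : List Int) (j k : Nat) (hjk : j < k) (heq : traj ml j = traj ml k)
    (halive : ∀ m, m ≤ k → inb ml (traj ml m)) : ∀ m, inb ml (traj ml m) := by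
  intro m
  induction m using Nat.strong_induction_on with
  | _ m ih =>
    rcases Nat.lt_or_ge m (k + 1) with h | h
    · exact halive m (Nat.lt_succ_iff.mp h)
    · set p := k - j with hp
      have hppos : 0 < p := Nat.sub_pos_of_lt hjk
      have hper : traj ml (j + p) = traj ml j := by
        have : j + p = k := by omega
        rw [this, heq]
      have hmp : traj ml m = traj ml (m - p) := by
        have h1 : j ≤ m - p := by omega
        have h2 : (m - p) + p = m := by omega
        have := traj_period ml j p hper (m - p) h1
        rw [h2] at this
        exact this
      rw [hmp]
      exact ih (m - p) (by omega)

-- an already-returned fold never changes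
theorem foldl_stepB_inr (ml : List Int) (s : Int) :
    ∀ l : List Int, l.foldl (stepB ml) (.inr s) = .inr s := by
  intro l
  induction l with
  | nil => rfl
  | cons x xs ih => simpa [stepB] using ih

-- if the walk never leaves the board, the fold never returns: it just follows traj
theorem foldl_stepB_alive (ml : List Int) (hall : ∀ m, inb ml (traj ml m)) :
    ∀ (j k : Nat),
      (PySem.List.pyRange ((k : Int) + 1) ((k : Int) + 1 + (j : Int)) 1).foldl
        (stepB ml) (.inl (traj ml k)) = .inl (traj ml (k + j)) := by
  intro j
  induction j with
  | zero =>
    intro k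
    rw [PySem.List.pyRange_one_eq_nil (by omega)]
    simp
  | succ j ih =>
    intro k
    rw [PySem.List.pyRange_one_cons (by push_cast; omega)]
    have hstep : traj ml k + (PySem.List.pyGet? ml (traj ml k)).getD 0 = traj ml (k + 1) := rfl
    have hin := hall (k + 1)
    rw [List.foldl_cons]
    show (PySem.List.pyRange ((k : Int) + 1 + 1) ((k : Int) + 1 + ((j : Int) + 1)) 1).foldl
        (stepB ml) (stepB ml (.inl (traj ml k)) ((k : Int) + 1)) = _
    have hsb : stepB ml (.inl (traj ml k)) ((k : Int) + 1) = .inl (traj ml (k + 1)) := by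
      simp only [stepB]
      rw [hstep, if_neg (by rcases hin with ⟨h1, h2⟩; omega)]
    rw [hsb]
    have hr : PySem.List.pyRange ((k : Int) + 1 + 1) ((k : Int) + 1 + ((j : Int) + 1)) 1
        = PySem.List.pyRange (((k + 1 : Nat) : Int) + 1) (((k + 1 : Nat) : Int) + 1 + (j : Int)) 1 := by
      congr 1 <;> (push_cast; ring)
    rw [hr, ih (k + 1)]
    have he : k + 1 + j = k + (j + 1) := by omega
    rw [he]

-- the main simulation: with matching fuel and the visited-dict describing exactly the
-- positions seen so far, A's loop returns what B's remaining fold returns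
theorem loop_eq (ml : List Int) :
    ∀ (f k : Nat) (visited : PySem.Dict Int Bool),
      (∀ m, m ≤ k → inb ml (traj ml m)) →
      (∀ d, visited.getD d false = true ↔ ∃ j, j ≤ k ∧ traj ml j = d) →
      f + k = ml.length →
      loopA ml f (traj ml k) (k : Int) visited
        = interp ((PySem.List.pyRange ((k : Int) + 1) ((ml.length : Int) + 1) 1).foldl
            (stepB ml) (.inl (traj ml k))) := by
  intro f
  induction f with
  | zero =>
    intro k visited _ _ hfuel
    rw [PySem.List.pyRange_one_eq_nil (by omega)]
    rfl
  | succ f ih =>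
    intro k visited halive hvis hfuel
    have hklt : k < ml.length := by omega
    rw [PySem.List.pyRange_one_cons (by push_cast; omega), List.foldl_cons]
    have hstep : traj ml k + (PySem.List.pyGet? ml (traj ml k)).getD 0 = traj ml (k + 1) := rfl
    rw [loopA, hstep]
    by_cases hout : traj ml (k + 1) ≥ (ml.length : Int) ∨ traj ml (k + 1) < 0
    · -- both exit at step k+1
      rw [if_pos hout]
      have hsb : stepB ml (.inl (traj ml k)) ((k : Int) + 1) = .inr ((k : Int) + 1) := by
        simp only [stepB]
        rw [hstep, if_pos hout]
      rw [hsb, foldl_stepB_inr]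
      rfl
    · rw [if_neg hout]
      have hin : inb ml (traj ml (k + 1)) := by unfold inb; omega
      have hsb : stepB ml (.inl (traj ml k)) ((k : Int) + 1) = .inl (traj ml (k + 1)) := by
        simp only [stepB]
        rw [hstep, if_neg hout]
      rw [hsb]
      have halive' : ∀ m, m ≤ k + 1 → inb ml (traj ml m) := by
        intro m hm
        rcases Nat.lt_or_ge m (k + 1) with h | h
        · exact halive m (Nat.lt_succ_iff.mp h)
        · have : m = k + 1 := le_antisymm hm h
          rw [this]; exact hin
      by_cases hnew : visited.getD (traj ml (k + 1)) false = true
      · -- revisit: A returns -1; B's fold is trapped and never returns either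
        rw [if_neg (by simpa using hnew)]
        obtain ⟨j, hj, hje⟩ := (hvis _).mp hnew
        have hall := never_exit ml j (k + 1) (Nat.lt_succ_of_le hj) hje halive'
        have hr : PySem.List.pyRange ((k : Int) + 1 + 1) ((ml.length : Int) + 1) 1
            = PySem.List.pyRange (((k + 1 : Nat) : Int) + 1)
                (((k + 1 : Nat) : Int) + 1 + ((ml.length - (k + 1) : Nat) : Int)) 1 := by
          congr 1 <;> (push_cast; omega)
        rw [hr, foldl_stepB_alive ml hall]
        rfl
      · -- fresh position: A recurses; B's fold continues on the tail range
        rw [if_pos (by simpa using hnew)]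
        have hc : ((k : Int) + 1) = ((k + 1 : Nat) : Int) := by push_cast; ring
        rw [hc]
        apply ih (k + 1)
        · exact halive'
        · intro d
          rw [PySem.Dict.getD_insert]
          constructor
          · intro h
            by_cases hd : d = traj ml (k + 1)
            · exact ⟨k + 1, le_refl _, hd.symm⟩
            · rw [if_neg hd] at h
              obtain ⟨j, hj, hje⟩ := (hvis d).mp h
              exact ⟨j, Nat.le_succ_of_le hj, hje⟩
          · rintro ⟨j, hj, hje⟩
            by_cases hd : d = traj ml (k + 1)
            · rw [if_pos hd]
            · rw [if_neg hd]
              apply (hvis d).mpr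
              rcases Nat.lt_or_ge j (k + 1) with h | h
              · exact ⟨j, Nat.lt_succ_iff.mp h, hje⟩
              · exact absurd hje (by rw [le_antisymm hj h] at hje ⊢; exact fun _ => hd hje.symm)
        · omega

-- ===== VERDICT (by name: the statement is the Claim_ definition above) =====
theorem solution_spec : Claim_equal_solution := by
  intro ml _ hpre
  unfold Spec_solution solution solution_alt
  have hlen : 0 < ml.length := List.length_pos_iff.mpr hpre
  have key := loop_eq ml ml.length 0 ((PySem.Dict.empty).insert 0 true) ?h1 ?h2 ?h3
  · simpa [traj, interp] using key
  case h1 =>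
    intro m hm
    have : m = 0 := Nat.le_zero.mp hm
    rw [this]
    refine ⟨le_refl _, ?_⟩
    show (0 : Int) < (ml.length : Int)
    exact_mod_cast hlen
  case h2 =>
    intro d
    rw [PySem.Dict.getD_insert, PySem.Dict.getD_empty]
    constructor
    · intro h
      by_cases hd : d = 0
      · exact ⟨0, le_refl 0, hd.symm⟩
      · rw [if_neg hd] at h; exact absurd h (by simp)
    · rintro ⟨j, hj, hje⟩
      have hj0 : j = 0 := Nat.le_zero.mp hj
      rw [hj0] at hje
      have hd : d = 0 := hje.symm
      rw [if_pos hd]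
  case h3 => omega
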